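-- pv_equiv track=rewrite | github.com/TheOriginalSoni/pyramid | pyramid.py | filter_doubleletters
-- ===== SOURCE A (Python) =====
-- import itertools
--
-- def filter_doubleletters(words,yn):
-- 	fs = set()
-- 	for word in words:
-- 		a = [''.join(g) for _, g in itertools.groupby(word)]
-- 		b = sum(list(map(lambda x:len(x)-1,a)))
-- 		if yn:
-- 			if(b>=1):
-- 				fs.add(word)
-- 		else:
-- 			if(not b>=1):
-- 				fs.add(word)
-- 	return fs
-- ===== SOURCE B (Python) =====
-- def filter_doubleletters(words, yn):
--     fs = set()
--     for word in words:
--         has = any(x == y for x, y in zip(word, word[1:]))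
--         if has == bool(yn):
--             fs.add(word)
--     return fs
-- ===== Notes on version B (the rewrite author's own statement) =====
-- stated objective: simpler
-- what changed: Replaces the groupby-runs/join/map/sum pipeline with a direct short-circuiting pairwise adjacency check per word.
import Mathlib
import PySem

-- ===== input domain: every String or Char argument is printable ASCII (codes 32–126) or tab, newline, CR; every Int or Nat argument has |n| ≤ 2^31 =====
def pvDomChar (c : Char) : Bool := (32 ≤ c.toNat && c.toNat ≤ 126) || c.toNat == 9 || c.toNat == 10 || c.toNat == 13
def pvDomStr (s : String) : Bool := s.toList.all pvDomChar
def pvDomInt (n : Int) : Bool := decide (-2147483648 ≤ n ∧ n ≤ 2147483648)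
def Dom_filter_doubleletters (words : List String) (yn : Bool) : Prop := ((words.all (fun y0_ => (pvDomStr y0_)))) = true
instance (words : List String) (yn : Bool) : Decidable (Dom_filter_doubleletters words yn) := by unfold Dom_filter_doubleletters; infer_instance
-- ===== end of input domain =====

-- B replaces A's groupby/join/map/sum pipeline by a direct pairwise adjacency check per word (simpler decomposition, same cost).

-- ===== PORT A =====
-- itertools.groupby over the characters of the word: maximal runs of equal characters
def pvRuns : List Char → List (List Char)
  | [] => []
  | [c] => [[c]]
  | c :: d :: rest =>
    match pvRuns (d :: rest) with
    | [] => [[c]]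
    | g :: gs => if c == d then (c :: g) :: gs else [c] :: g :: gs

def filter_doubleletters (words : List String) (yn : Bool) : List String :=
  words.foldl (fun fs word =>
    let a : List String := (pvRuns word.toList).map (fun g => String.ofList g)
    let b : Int := (a.map (fun x => (x.toList.length : Int) - 1)).sum
    if yn then (if b ≥ 1 then PySem.Set.add fs word else fs)
    else (if ¬ (b ≥ 1) then PySem.Set.add fs word else fs)) PySem.Set.empty

-- ===== PORT B =====
-- any(x == y for x, y in zip(word, word[1:])): short-circuiting adjacent-equal scan
def pvHasAdj : List Char → Bool
  | a :: b :: rest => a == b || pvHasAdj (b :: rest)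
  | _ => false

def filter_doubleletters_alt (words : List String) (yn : Bool) : List String :=
  words.foldl (fun fs word =>
    if pvHasAdj word.toList == yn then PySem.Set.add fs word else fs) PySem.Set.empty

-- ===== PRECONDITION & SPEC =====
def Spec_filter_doubleletters (words : List String) (yn : Bool) (out : List String) : Prop := out = filter_doubleletters_alt words yn
instance (words : List String) (yn : Bool) (out : List String) : Decidable (Spec_filter_doubleletters words yn out) := by unfold Spec_filter_doubleletters; infer_instance

-- ===== CLAIM (what is proved, stated in full; the proofs are below) =====
def Claim_equal_filter_doubleletters : Prop := ∀ (words : List String) (yn : Bool), Dom_filter_doubleletters words yn → Spec_filter_doubleletters words yn (filter_doubleletters words yn)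

-- ===== LEMMAS AND PROOFS =====

def pvBsum (gs : List (List Char)) : Int := (gs.map (fun g => (g.length : Int) - 1)).sum

theorem pvRuns_ne_nil (c : Char) (l : List Char) : pvRuns (c :: l) ≠ [] := by
  cases l with
  | nil => simp [pvRuns]
  | cons d rest =>
    simp only [pvRuns]
    cases pvRuns (d :: rest) with
    | nil => simp
    | cons g gs => by_cases h : c == d <;> simp [h]

-- joint invariant: the groupby count is nonnegative, and ≥ 1 exactly when some adjacent pair is equal
theorem pvBsum_runs (l : List Char) :
    0 ≤ pvBsum (pvRuns l) ∧ (1 ≤ pvBsum (pvRuns l) ↔ pvHasAdj l = true) := by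
  induction l with
  | nil => simp [pvRuns, pvBsum, pvHasAdj]
  | cons c rest ih =>
    cases rest with
    | nil => simp [pvRuns, pvBsum, pvHasAdj]
    | cons d rest' =>
      obtain ⟨h0, hiff⟩ := ih
      have hne := pvRuns_ne_nil d rest'
      simp only [pvRuns]
      cases hg : pvRuns (d :: rest') with
      | nil => exact absurd hg hne
      | cons g gs =>
        rw [hg] at h0 hiff
        cases hadj : pvHasAdj (d :: rest') with
        | true =>
          have h1 : 1 ≤ pvBsum (g :: gs) := hiff.mpr hadj
          by_cases hcd : c == d <;>
            simp only [hcd, if_pos, if_neg, Bool.false_eq_true, not_false_iff, pvBsum,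
              List.map_cons, List.sum_cons, List.length_cons, pvHasAdj, hadj,
              Bool.or_true, iff_true] at *
          · omega
          · constructor
            · omega
            · omega
        | false =>
          have h1 : ¬ 1 ≤ pvBsum (g :: gs) := by
            intro h; exact absurd (hiff.mp h) (by simp [hadj])
          by_cases hcd : c == d <;>
            simp only [hcd, if_pos, if_neg, Bool.false_eq_true, not_false_iff, pvBsum,
              List.map_cons, List.sum_cons, List.length_cons, pvHasAdj, hadj,
              Bool.or_false] at *
          all_goals first
            | (constructor <;> omega)
            | omega
            | (constructor; · omega
               simp [hcd]; omega)

theorem pv_step_eq (yn : Bool) (fs : List String) (word : String) :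
    (let a : List String := (pvRuns word.toList).map (fun g => String.ofList g)
     let b : Int := (a.map (fun x => (x.toList.length : Int) - 1)).sum
     if yn then (if b ≥ 1 then PySem.Set.add fs word else fs)
     else (if ¬ (b ≥ 1) then PySem.Set.add fs word else fs))
    = (if pvHasAdj word.toList == yn then PySem.Set.add fs word else fs) := by
  have hb : ((pvRuns word.toList).map (fun g => String.ofList g)
      |>.map (fun x => (x.toList.length : Int) - 1)).sum = pvBsum (pvRuns word.toList) := by
    simp [pvBsum, List.map_map, Function.comp_def, String.length_ofList]
  obtain ⟨h0, hiff⟩ := pvBsum_runs word.toList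
  simp only [hb]
  cases yn with
  | false =>
    cases hA : pvHasAdj word.toList with
    | false =>
      have : ¬ 1 ≤ pvBsum (pvRuns word.toList) := by rw [hiff]; simp [hA]
      simp [this]
    | true =>
      have : 1 ≤ pvBsum (pvRuns word.toList) := hiff.mpr hA
      simp [this]
  | true =>
    cases hA : pvHasAdj word.toList with
    | false =>
      have : ¬ 1 ≤ pvBsum (pvRuns word.toList) := by rw [hiff]; simp [hA]
      simp [this]
    | true =>
      have : 1 ≤ pvBsum (pvRuns word.toList) := hiff.mpr hA
      simp [this]

-- ===== VERDICT (by name: the statement is the Claim_ definition above) =====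
theorem filter_doubleletters_spec : Claim_equal_filter_doubleletters := by
  intro words yn _
  unfold Spec_filter_doubleletters filter_doubleletters filter_doubleletters_alt
  congr 1
  funext fs word
  exact pv_step_eq yn fs word
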